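-- pv_equiv track=rewrite | github.com/guilhermefmk/Engenharia-de-dados-AWS---PB-Compass.uol | Sprint2 - Python/Semana 1/Lista 1/parte2/12.py | reparteLista
-- ===== SOURCE A (Python) =====
-- def reparteLista(lista: list, size: int):
--     result = [[] for x in range(size)]
--     resto = len(lista) % size
--     tamanhos = [len(lista)// size for x in range(size)]
--     iterador = 0
--     if resto != 0:
--         for i in range(resto):
--             tamanhos[iterador] += 1
--             iterador += 1
--     for i in range(size):
--         for j in range(tamanhos[i]):
--             result[i].append(lista.pop(0))
--     return(result)
-- ===== SOURCE B (Python) =====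
-- def reparteLista(lista: list, size: int):
--     q, r = divmod(len(lista), size)
--     result = []
--     for i in range(size):
--         sz = q + (1 if i < r else 0)
--         chunk = lista[:sz]
--         del lista[:sz]
--         result.append(chunk)
--     return result
-- ===== Notes on version B (the rewrite author's own statement) =====
-- stated objective: faster
-- what changed: Per-bucket sizes come from one divmod (q plus 1 for the first r buckets) and each chunk is taken with a slice + del of a prefix, replacing A's remainder-distribution loop over a tamanhos table and its nested element-by-element pop(0) loop.
import Mathlib
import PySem

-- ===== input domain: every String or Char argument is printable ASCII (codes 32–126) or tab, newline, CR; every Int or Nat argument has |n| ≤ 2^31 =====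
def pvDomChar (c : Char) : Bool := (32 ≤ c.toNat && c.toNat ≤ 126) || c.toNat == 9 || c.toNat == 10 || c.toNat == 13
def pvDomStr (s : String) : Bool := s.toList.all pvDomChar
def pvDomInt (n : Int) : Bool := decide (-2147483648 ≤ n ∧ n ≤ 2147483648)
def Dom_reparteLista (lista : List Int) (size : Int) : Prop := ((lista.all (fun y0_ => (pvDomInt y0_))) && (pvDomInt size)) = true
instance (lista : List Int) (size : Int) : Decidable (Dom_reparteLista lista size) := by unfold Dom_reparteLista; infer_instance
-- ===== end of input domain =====

-- B computes each bucket's size in closed form from one divmod and slices the chunks off,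
-- replacing A's remainder-distribution table plus nested pop(0) loop; equivalence of RETURN
-- values is proved (both Pythons also empty `lista` in place identically).

-- ===== PORT A =====
-- loop body of 'result[i].append(lista.pop(0))'; the 'none' branch is Python's IndexError
-- on pop from an empty list, unreachable when size ≠ 0
def pvPopStep (i : Int) (s : List (List Int) × List Int) : List (List Int) × List Int :=
  match PySem.List.pop? s.2 0 with
  | some (x, rest) => (PySem.List.pySetD s.1 i (PySem.List.pyGetD s.1 i [] ++ [x]), rest)
  | none => s

def reparteLista (lista : List Int) (size : Int) : List (List Int) :=
  let result : List (List Int) := (PySem.List.pyRange 0 size 1).map (fun _ => [])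
  let resto : Int := PySem.Int.mod (lista.length : Int) size
  let tamanhos0 : List Int :=
    (PySem.List.pyRange 0 size 1).map (fun _ => PySem.Int.floordiv (lista.length : Int) size)
  let tamanhos : List Int :=
    if resto ≠ 0 then
      ((PySem.List.pyRange 0 resto 1).foldl
        (fun (s : List Int × Int) _ =>
          (PySem.List.pySetD s.1 s.2 (PySem.List.pyGetD s.1 s.2 0 + 1), s.2 + 1))
        (tamanhos0, 0)).1
    else tamanhos0
  ((PySem.List.pyRange 0 size 1).foldl
    (fun (s : List (List Int) × List Int) i =>
      (PySem.List.pyRange 0 (PySem.List.pyGetD tamanhos i 0) 1).foldl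
        (fun t _ => pvPopStep i t) s)
    (result, lista)).1

-- ===== PORT B =====
def reparteLista_alt (lista : List Int) (size : Int) : List (List Int) :=
  let q : Int := PySem.Int.floordiv (lista.length : Int) size
  let r : Int := PySem.Int.mod (lista.length : Int) size
  ((PySem.List.pyRange 0 size 1).foldl
    (fun (s : List (List Int) × List Int) i =>
      let sz : Int := q + (if i < r then 1 else 0)
      (s.1 ++ [PySem.List.slice s.2 none (some sz)], PySem.List.slice s.2 (some sz) none))
    ([], lista)).1

-- ===== PRECONDITION & SPEC =====
-- size = 0 makes both Pythons raise ZeroDivisionError; that is the only raising input.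
def Pre_reparteLista (lista : List Int) (size : Int) : Prop := size ≠ 0
instance (lista : List Int) (size : Int) : Decidable (Pre_reparteLista lista size) := by
  unfold Pre_reparteLista; infer_instance

def pvWitness_reparteLista : List Int × Int := ([1, 2, 3, 4, 5], 2)

def Spec_reparteLista (lista : List Int) (size : Int) (out : List (List Int)) : Prop := out = reparteLista_alt lista size
instance (lista : List Int) (size : Int) (out : List (List Int)) : Decidable (Spec_reparteLista lista size out) := by unfold Spec_reparteLista; infer_instance

-- ===== CLAIM (what is proved, stated in full; the proofs are below) =====
def Claim_equal_reparteLista : Prop := ∀ (lista : List Int) (size : Int), Dom_reparteLista lista size → Pre_reparteLista lista size → Spec_reparteLista lista size (reparteLista lista size)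

-- ===== LEMMAS AND PROOFS =====

-- the common value: chunks of the given sizes, cut off the front one after the other
def chunksN : List Nat → List Int → List (List Int)
  | [], _ => []
  | t :: ts, l => l.take t :: chunksN ts (l.drop t)

theorem pySetD_natCast' {α : Type} (xs : List α) (n : Nat) (v : α) (h : n < xs.length) :
    PySem.List.pySetD xs (n : Int) v = xs.set n v := by
  simp [PySem.List.pySetD, PySem.List.pySet?, PySem.List.pyIdx?, h]

theorem set_append_cons {α : Type} (pre : List α) (x : α) (tl : List α) (v : α) :
    (pre ++ x :: tl).set pre.length v = pre ++ v :: tl := by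
  induction pre with
  | nil => rfl
  | cons a pre ih => simp [ih]

theorem getD_append_cons {α : Type} (pre : List α) (x : α) (tl : List α) (d : α) :
    (pre ++ x :: tl).getD pre.length d = x := by
  induction pre with
  | nil => rfl
  | cons a pre ih => simpa using ih

-- the remainder-distribution loop of A, as an iterate
theorem inc_iter (m : Nat) : ∀ (pre post : List Int), m ≤ post.length →
    (fun (s : List Int × Int) =>
        (PySem.List.pySetD s.1 s.2 (PySem.List.pyGetD s.1 s.2 0 + 1), s.2 + 1))^[m]
      (pre ++ post, (pre.length : Int))
    = (pre ++ (post.take m).map (· + 1) ++ post.drop m, (pre.length : Int) + m) := by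
  induction m with
  | zero => intro pre post _; simp
  | succ m ih =>
    intro pre post hm
    cases post with
    | nil => simp at hm
    | cons x tl =>
      rw [Function.iterate_succ_apply]
      have hx : PySem.List.pyGetD (pre ++ x :: tl) (pre.length : Int) 0 = x := by
        rw [PySem.List.pyGetD_natCast, getD_append_cons]
      have hlen : pre.length < (pre ++ x :: tl).length := by simp
      have hset : PySem.List.pySetD (pre ++ x :: tl) (pre.length : Int) (x + 1)
          = (pre ++ [x + 1]) ++ tl := by
        rw [pySetD_natCast' _ _ _ hlen, set_append_cons]; simp
      simp only [hx, hset]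
      have : ((pre.length : Int) + 1) = (((pre ++ [x + 1]).length : Nat) : Int) := by
        simp
      rw [this, ih (pre ++ [x + 1]) tl (by simpa using hm)]
      simp [List.append_assoc]; omega

-- one bucket of A's nested loop: popping the first m elements into slot i
theorem pop_iter (m : Nat) : ∀ (i : Nat) (res : List (List Int)) (rest : List Int),
    i < res.length → m ≤ rest.length →
    (pvPopStep (i : Int))^[m] (res, rest)
    = (res.set i (res.getD i [] ++ rest.take m), rest.drop m) := by
  induction m with
  | zero =>
    intro i res rest hi _
    simp [List.getD, List.getElem?_eq_getElem hi, List.set_getElem_self]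
  | succ m ih =>
    intro i res rest hi hm
    cases rest with
    | nil => simp at hm
    | cons x tl =>
      rw [Function.iterate_succ_apply]
      have hstep : pvPopStep (i : Int) (res, x :: tl)
          = (res.set i (res.getD i [] ++ [x]), tl) := by
        simp [pvPopStep, PySem.List.pop?_zero_cons, pySetD_natCast' _ _ _ hi,
          PySem.List.pyGetD_natCast]
      rw [hstep, ih i _ tl (by simpa using hi) (by simpa using hm)]
      simp only [List.getD, List.getElem?_set_self (by simpa using hi : i < res.length),
        Option.getD_some, List.set_set, List.append_assoc, List.singleton_append,
        List.take_succ_cons, List.drop_succ_cons]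

-- the slicing loop of B, folded over the size list
theorem foldl_chunks (ts : List Nat) : ∀ (acc : List (List Int)) (l : List Int),
    ts.foldl (fun (s : List (List Int) × List Int) t => (s.1 ++ [s.2.take t], s.2.drop t)) (acc, l)
    = (acc ++ chunksN ts l, l.drop ts.sum) := by
  induction ts with
  | nil => intro acc l; simp [chunksN]
  | cons t ts ih =>
    intro acc l
    simp only [List.foldl_cons, ih, chunksN, List.sum_cons, List.drop_drop]
    simp [List.append_assoc, Nat.add_comm]

-- A's outer loop over buckets [a, a+cnt), given enough elements remain
theorem outer_iter (szf : Nat → Nat) (cnt : Nat) : ∀ (a : Nat) (done : List (List Int)) (rest : List Int),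
    done.length = a → ((List.range' a cnt).map szf).sum ≤ rest.length →
    (List.range' a cnt).foldl (fun (s : List (List Int) × List Int) (k : Nat) => (pvPopStep (k : Int))^[szf k] s)
      (done ++ List.replicate cnt [], rest)
    = (done ++ chunksN ((List.range' a cnt).map szf) rest,
       rest.drop (((List.range' a cnt).map szf).sum)) := by
  induction cnt with
  | zero => intro a done rest _ _; simp [chunksN]
  | succ cnt ih =>
    intro a done rest hdone hsum
    rw [List.range'_succ] at hsum ⊢
    simp only [List.map_cons, List.sum_cons] at hsum ⊢
    simp only [List.foldl_cons, List.replicate_succ]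
    have hi : a < (done ++ [] :: List.replicate cnt ([] : List Int)).length := by
      simp [hdone]
    rw [pop_iter (szf a) a _ rest hi (by omega)]
    have hget : (done ++ [] :: List.replicate cnt ([] : List Int)).getD a [] = [] := by
      rw [← hdone, getD_append_cons]
    have hset : (done ++ [] :: List.replicate cnt ([] : List Int)).set a ([] ++ rest.take (szf a))
        = (done ++ [rest.take (szf a)]) ++ List.replicate cnt [] := by
      rw [← hdone, set_append_cons]; simp
    rw [hget, hset, ih (a + 1) _ (rest.drop (szf a)) (by simp [hdone]) (by simp; omega)]
    simp [chunksN, List.append_assoc, List.drop_drop]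

theorem getD_repl_append (a b : Int) (rn m k : Nat) (h : k < rn + m) :
    (List.replicate rn a ++ List.replicate m b).getD k 0 = if k < rn then a else b := by
  by_cases hk : k < rn
  · simp [List.getD, List.getElem?_append_left, List.length_replicate, hk]
  · have h1 : rn ≤ k := Nat.le_of_not_lt hk
    have h2 : k - rn < m := by omega
    simp [List.getD, List.getElem?_append_right, List.length_replicate, h1, h2, hk]

theorem sum_szN (n rn qn : Nat) (h : rn ≤ n) :
    ((List.range' 0 n).map (fun k => if k < rn then qn + 1 else qn)).sum = n * qn + rn := by
  obtain ⟨d, rfl⟩ : ∃ d, n = rn + d := ⟨n - rn, by omega⟩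
  rw [← List.range'_append]
  have h1 : (List.range' 0 rn).map (fun k => if k < rn then qn + 1 else qn)
      = List.replicate rn (qn + 1) := by
    rw [List.eq_replicate_iff]
    refine ⟨by simp, ?_⟩
    intro b hb
    obtain ⟨k, hk, rfl⟩ := List.mem_map.1 hb
    have := (List.mem_range'_1.1 hk).2
    simp only [if_pos (by omega : k < rn)]
  have h2 : (List.range' (0 + 1 * rn) d).map (fun k => if k < rn then qn + 1 else qn)
      = List.replicate d qn := by
    rw [List.eq_replicate_iff]
    refine ⟨by simp, ?_⟩
    intro b hb
    obtain ⟨k, hk, rfl⟩ := List.mem_map.1 hb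
    have := (List.mem_range'_1.1 hk).1
    simp only [if_neg (by omega : ¬ k < rn)]
  rw [List.map_append, h1, h2, List.sum_append, List.sum_replicate, List.sum_replicate,
    smul_eq_mul, smul_eq_mul]
  ring

theorem pyRange_natCast_eq (n : Nat) :
    PySem.List.pyRange 0 (n : Int) 1 = List.map (fun k : Nat => (k : Int)) (List.range n) := by
  rw [PySem.List.pyRange_one]
  simp only [sub_zero, Int.toNat_natCast, zero_add]

-- closed form of both ports for positive size
theorem ports_pos (lista : List Int) (size : Int) (hs : 0 < size) :
    reparteLista lista size
      = chunksN ((List.range size.toNat).map (fun k =>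
          if k < (PySem.Int.mod (lista.length : Int) size).toNat
          then (PySem.Int.floordiv (lista.length : Int) size).toNat + 1
          else (PySem.Int.floordiv (lista.length : Int) size).toNat)) lista ∧
    reparteLista_alt lista size
      = chunksN ((List.range size.toNat).map (fun k =>
          if k < (PySem.Int.mod (lista.length : Int) size).toNat
          then (PySem.Int.floordiv (lista.length : Int) size).toNat + 1
          else (PySem.Int.floordiv (lista.length : Int) size).toNat)) lista := by
  have hq0 : 0 ≤ PySem.Int.floordiv (lista.length : Int) size := by
    rw [PySem.Int.floordiv_eq_ediv_of_pos hs]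
    exact Int.ediv_nonneg (by positivity) (le_of_lt hs)
  have hr0 : 0 ≤ PySem.Int.mod (lista.length : Int) size := PySem.Int.mod_nonneg _ hs
  have hrlt : PySem.Int.mod (lista.length : Int) size < size := PySem.Int.mod_lt _ hs
  obtain ⟨qn, hq⟩ : ∃ qn : Nat, PySem.Int.floordiv (lista.length : Int) size = (qn : Int) :=
    ⟨_, (Int.toNat_of_nonneg hq0).symm⟩
  obtain ⟨rn, hr⟩ : ∃ rn : Nat, PySem.Int.mod (lista.length : Int) size = (rn : Int) :=
    ⟨_, (Int.toNat_of_nonneg hr0).symm⟩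
  obtain ⟨n, hn⟩ : ∃ n : Nat, size = (n : Int) :=
    ⟨_, (Int.toNat_of_nonneg (le_of_lt hs)).symm⟩
  have hrnn : rn < n := by
    have h1 : (rn : Int) < (n : Int) := by rw [← hr, ← hn]; exact hrlt
    exact_mod_cast h1
  have hL : qn * n + rn = lista.length := by
    have h := PySem.Int.floordiv_mul_add_mod (lista.length : Int) size
    rw [hq, hr, hn] at h
    exact_mod_cast h
  have hsumle : ((List.range' 0 n).map (fun k => if k < rn then qn + 1 else qn)).sum
      = lista.length := by
    rw [sum_szN n rn qn (by omega), Nat.mul_comm]; exact hL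
  have hres : List.map (fun _ => ([] : List Int))
      (List.map (fun k : Nat => (k : Int)) (List.range n)) = List.replicate n [] := by
    rw [List.map_map]
    exact (List.map_const' ..).trans (by simp)
  have htam0 : List.map (fun _ => ((qn : Nat) : Int))
      (List.map (fun k : Nat => (k : Int)) (List.range n)) = List.replicate n (qn : Int) := by
    rw [List.map_map]
    exact (List.map_const' ..).trans (by simp)
  constructor
  · -- ===== port A =====
    simp only [reparteLista]
    rw [hq, hr, hn, pyRange_natCast_eq n, hres, htam0]
    simp only [Int.toNat_natCast]
    -- the remainder loop turns the constant table into the front-loaded one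
    have htam : (if (rn : Int) ≠ 0 then
          ((PySem.List.pyRange 0 (rn : Int) 1).foldl
            (fun (s : List Int × Int) _ =>
              (PySem.List.pySetD s.1 s.2 (PySem.List.pyGetD s.1 s.2 0 + 1), s.2 + 1))
            (List.replicate n ((qn : Nat) : Int), 0)).1
        else List.replicate n ((qn : Nat) : Int))
        = List.replicate rn ((qn : Int) + 1) ++ List.replicate (n - rn) (qn : Int) := by
      by_cases hrz : rn = 0
      · subst hrz; simp
      · rw [if_pos (by exact_mod_cast hrz), List.foldl_const, PySem.List.length_pyRange_one]
        have hlen : (((rn : Nat) : Int) - 0).toNat = rn := by omega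
        rw [hlen,
          show ((List.replicate n ((qn : Nat) : Int), (0 : Int)) : List Int × Int)
            = ([] ++ List.replicate n ((qn : Nat) : Int), (([] : List Int).length : Int))
          from by simp,
          inc_iter rn [] (List.replicate n ((qn : Nat) : Int)) (by simp; omega)]
        simp only [List.nil_append, List.take_replicate, List.drop_replicate,
          List.map_replicate, min_eq_left (by omega : rn ≤ n)]
    rw [htam, List.foldl_map]
    have hcong : ∀ (s : List (List Int) × List Int), ∀ k ∈ List.range n,
        ((PySem.List.pyRange 0
            (PySem.List.pyGetD
              (List.replicate rn ((qn : Int) + 1) ++ List.replicate (n - rn) (qn : Int))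
              ((k : Nat) : Int) 0) 1).foldl (fun t _ => pvPopStep ((k : Nat) : Int) t) s)
        = (pvPopStep ((k : Nat) : Int))^[if k < rn then qn + 1 else qn] s := by
      intro s k hk
      have hk' : k < n := List.mem_range.1 hk
      have hget : PySem.List.pyGetD
          (List.replicate rn ((qn : Int) + 1) ++ List.replicate (n - rn) (qn : Int))
          ((k : Nat) : Int) 0 = (((if k < rn then qn + 1 else qn) : Nat) : Int) := by
        rw [PySem.List.pyGetD_natCast, getD_repl_append _ _ _ _ _ (by omega)]
        by_cases hkr : k < rn <;> simp [hkr]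
      rw [hget, List.foldl_const, PySem.List.length_pyRange_one,
        show ((((if k < rn then qn + 1 else qn) : Nat) : Int) - 0).toNat
          = (if k < rn then qn + 1 else qn) from by omega]
    rw [PySem.List.foldl_congr_mem _ _ _ _ hcong, List.range_eq_range']
    have hout := outer_iter (fun k => if k < rn then qn + 1 else qn) n 0 [] lista rfl
      (le_of_eq hsumle)
    simp only [List.nil_append] at hout
    rw [hout]
  · -- ===== port B =====
    simp only [reparteLista_alt]
    rw [hq, hr, hn, pyRange_natCast_eq n]
    simp only [Int.toNat_natCast]
    rw [List.foldl_map]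
    have hcong : ∀ (s : List (List Int) × List Int), ∀ k ∈ List.range n,
        ((s.1 ++ [PySem.List.slice s.2 none
            (some ((qn : Int) + (if ((k : Nat) : Int) < (rn : Int) then 1 else 0)))],
          PySem.List.slice s.2
            (some ((qn : Int) + (if ((k : Nat) : Int) < (rn : Int) then 1 else 0))) none))
        = (s.1 ++ [s.2.take (if k < rn then qn + 1 else qn)],
           s.2.drop (if k < rn then qn + 1 else qn)) := by
      intro s k _
      have hsz : (qn : Int) + (if ((k : Nat) : Int) < (rn : Int) then 1 else 0)
          = (((if k < rn then qn + 1 else qn) : Nat) : Int) := by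
        by_cases hkr : k < rn
        · have h1 : ((k : Nat) : Int) < (rn : Int) := by exact_mod_cast hkr
          simp [hkr, h1]
        · have h1 : ¬ (((k : Nat) : Int) < (rn : Int)) := by exact_mod_cast hkr
          simp [hkr, h1]
      rw [hsz, PySem.List.slice_to_natCast, PySem.List.slice_from_natCast]
    rw [PySem.List.foldl_congr_mem _ _ _ _ hcong,
      ← List.foldl_map (f := fun k => if k < rn then qn + 1 else qn)
        (g := fun (s : List (List Int) × List Int) t => (s.1 ++ [s.2.take t], s.2.drop t)),
      foldl_chunks]
    simp

-- ===== VERDICT (by name: the statement is the Claim_ definition above) =====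
theorem reparteLista_spec : Claim_equal_reparteLista := by
  intro lista size _ hpre
  unfold Spec_reparteLista
  rcases lt_or_gt_of_ne hpre with h | h
  · have hnil : PySem.List.pyRange 0 size 1 = [] := PySem.List.pyRange_one_eq_nil (by omega)
    simp [reparteLista, reparteLista_alt, hnil]
  · obtain ⟨ha, hb⟩ := ports_pos lista size h
    rw [ha, hb]
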